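-- pv_equiv track=rewrite | github.com/FalkoGiep/Wavelets_Graduation | LibAdapt.py | GetDOFS
-- ===== SOURCE A (Python) =====
-- def GetDOFS( iC ):
--     wDOFS = []
--
--     dof = 0
--     for ii in range(0,len(iC)):
--         for jj in range(0,len(iC[ii])):
--             if iC[ii][jj] == 1:
--                 wDOFS.append( dof )
--
--             dof += 1
--
--     return wDOFS
-- ===== SOURCE B (Python) =====
-- def GetDOFS(iC):
--     # Stage 1: prefix-sum the row lengths into per-row starting offsets.
--     offsets = []
--     total = 0
--     for row in iC:
--         offsets.append(total)
--         total += len(row)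
--     # Stage 2: per row, local positions of ones shifted by the row's offset.
--     return [off + j for off, row in zip(offsets, iC)
--                     for j, v in enumerate(row) if v == 1]
-- ===== Notes on version B (the rewrite author's own statement) =====
-- stated objective: alternative
-- what changed: Replaces the single hand-threaded global dof counter with a two-stage scheme: a prefix-sum pass computing each row's starting offset, then per-row local enumeration of ones shifted by the row offset.
import Mathlib
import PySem

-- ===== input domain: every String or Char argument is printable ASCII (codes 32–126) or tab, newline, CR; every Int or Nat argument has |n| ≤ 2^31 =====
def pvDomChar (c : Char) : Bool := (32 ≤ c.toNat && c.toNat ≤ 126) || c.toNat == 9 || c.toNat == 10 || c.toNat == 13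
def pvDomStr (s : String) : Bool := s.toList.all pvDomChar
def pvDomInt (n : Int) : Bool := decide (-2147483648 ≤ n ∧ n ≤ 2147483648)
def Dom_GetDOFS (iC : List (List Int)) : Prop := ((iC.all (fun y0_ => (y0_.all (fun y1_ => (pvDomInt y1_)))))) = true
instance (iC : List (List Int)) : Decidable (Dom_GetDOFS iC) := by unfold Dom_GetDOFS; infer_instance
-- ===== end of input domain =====

-- B precomputes per-row starting offsets by a prefix-sum pass and then collects per-row local one-positions shifted by the offset; A threads one global counter (objective: alternative).

-- ===== PORT A =====
-- nested loops appending dof when the entry equals 1, threading (wDOFS, dof)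
def GetDOFS (iC : List (List Int)) : List Int :=
  (iC.foldl
    (fun st row =>
      row.foldl (fun st2 v => (if v == 1 then st2.1 ++ [st2.2] else st2.1, st2.2 + 1)) st)
    (([] : List Int), (0 : Int))).1

-- ===== PORT B =====
-- stage 1: offsets/total loop; stage 2: comprehension over zip(offsets, iC) with local enumerate
def GetDOFS_alt (iC : List (List Int)) : List Int :=
  let offsets :=
    (iC.foldl (fun st row => (st.1 ++ [st.2], st.2 + (row.length : Int)))
      (([] : List Int), (0 : Int))).1
  (offsets.zip iC).flatMap
    (fun p => ((PySem.List.enumerate p.2).filter (fun q => q.2 == 1)).map (fun q => p.1 + q.1))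

-- ===== PRECONDITION & SPEC =====
def Spec_GetDOFS (iC : List (List Int)) (out : List Int) : Prop := out = GetDOFS_alt iC
instance (iC : List (List Int)) (out : List Int) : Decidable (Spec_GetDOFS iC out) := by unfold Spec_GetDOFS; infer_instance

-- ===== CLAIM (what is proved, stated in full; the proofs are below) =====
def Claim_equal_GetDOFS : Prop := ∀ (iC : List (List Int)), Dom_GetDOFS iC → Spec_GetDOFS iC (GetDOFS iC)

-- ===== LEMMAS AND PROOFS =====

-- flat indices (starting at d) of the ones of xs
def pvOnes (xs : List Int) (d : Int) : List Int :=
  ((PySem.List.enumerate xs d).filter (fun p => p.2 == 1)).map (·.1)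

-- the per-row starting offsets, written recursively
def pvOffs (iC : List (List Int)) (d : Int) : List Int :=
  match iC with
  | [] => []
  | r :: rs => d :: pvOffs rs (d + r.length)

theorem pvOnes_cons (x : Int) (xs : List Int) (d : Int) :
    pvOnes (x :: xs) d = (if x == 1 then [d] else []) ++ pvOnes xs (d + 1) := by
  simp [pvOnes, PySem.List.enumerate_cons]
  split_ifs with h <;> simp [h]

theorem pvOnes_append (xs ys : List Int) (d : Int) :
    pvOnes (xs ++ ys) d = pvOnes xs d ++ pvOnes ys (d + xs.length) := by
  simp [pvOnes, PySem.List.enumerate_append, List.filter_append]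

-- inner loop of A
theorem inner_fold (row : List Int) (acc : List Int) (d : Int) :
    row.foldl (fun st2 v => (if v == 1 then st2.1 ++ [st2.2] else st2.1, st2.2 + 1)) (acc, d)
      = (acc ++ pvOnes row d, d + row.length) := by
  induction row generalizing acc d with
  | nil => simp [pvOnes]
  | cons x xs ih =>
    simp only [List.foldl_cons, ih, pvOnes_cons]
    split_ifs <;> simp <;> ring_nf

-- outer loop of A, characterised against the flattened list
theorem outer_fold (iC : List (List Int)) (acc : List Int) (d : Int) :
    iC.foldl
      (fun st row =>
        row.foldl (fun st2 v => (if v == 1 then st2.1 ++ [st2.2] else st2.1, st2.2 + 1)) st)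
      (acc, d)
      = (acc ++ pvOnes (iC.foldr (fun row a => row ++ a) []) d,
         d + ((iC.foldr (fun row a => row ++ a) [] : List Int)).length) := by
  induction iC generalizing acc d with
  | nil => simp [pvOnes]
  | cons r rs ih =>
    simp only [List.foldl_cons, List.foldr_cons, inner_fold, ih, pvOnes_append]
    refine Prod.ext ?_ ?_
    · simp [List.append_assoc]
    · simp; ring

-- B's offsets loop computes pvOffs
theorem offs_fold (iC : List (List Int)) (acc : List Int) (d : Int) :
    iC.foldl (fun st row => (st.1 ++ [st.2], st.2 + (row.length : Int))) (acc, d)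
      = (acc ++ pvOffs iC d, d + ((iC.foldr (fun row a => row ++ a) [] : List Int)).length) := by
  induction iC generalizing acc d with
  | nil => simp [pvOffs]
  | cons r rs ih =>
    simp only [List.foldl_cons, ih, pvOffs]
    refine Prod.ext ?_ ?_
    · simp
    · simp; ring

-- shifting the local one-positions of a row by d gives pvOnes at offset d + s
theorem ones_shift (xs : List Int) (s d : Int) :
    ((PySem.List.enumerate xs s).filter (fun q => q.2 == 1)).map (fun q => d + q.1)
      = pvOnes xs (d + s) := by
  induction xs generalizing s with
  | nil => simp [pvOnes]
  | cons x t ih =>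
    rw [pvOnes_cons, PySem.List.enumerate_cons]
    by_cases h : x = 1
    · simp [h, ih, add_assoc]
    · simp [h, ih, add_assoc]

-- B's second stage equals the flat-list characterisation
theorem zip_flatMap (iC : List (List Int)) (d : Int) :
    ((pvOffs iC d).zip iC).flatMap
        (fun p => ((PySem.List.enumerate p.2).filter (fun q => q.2 == 1)).map (fun q => p.1 + q.1))
      = pvOnes (iC.foldr (fun row a => row ++ a) []) d := by
  induction iC generalizing d with
  | nil => simp [pvOnes]
  | cons r rs ih =>
    simp only [pvOffs, List.zip_cons_cons, List.flatMap_cons, List.foldr_cons, pvOnes_append, ih]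
    congr 1
    simpa using ones_shift r 0 d

-- ===== VERDICT (by name: the statement is the Claim_ definition above) =====
theorem GetDOFS_spec : Claim_equal_GetDOFS := by
  intro iC _
  show GetDOFS iC = GetDOFS_alt iC
  simp only [GetDOFS, GetDOFS_alt, outer_fold, offs_fold, List.nil_append, zip_flatMap]
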